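-- pv_equiv track=rewrite | github.com/worstprogrammerCN/grade-2-summer-vacation-class | project/submission.py | get_vowel_consonant_map
-- ===== SOURCE A (Python) =====
-- vowel_phonemes_list = ['AA', 'AE', 'AH', 'AO', 'AW', 'AY', 'EH', 'ER', 'EY', 'IH', 'IY', 'OW', 'OY', 'UH', 'UW']
--
-- vowel_phonemes_set = set(vowel_phonemes_list)
--
-- consonant_phonemes_list = ['P', 'B', 'CH', 'D', 'DH', 'F', 'G', 'HH', 'JH', 'K', 'L', 'M',
--      'N', 'NG', 'R', 'S', 'SH', 'T', 'TH', 'V', 'W', 'Y', 'Z', 'ZH']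
--
-- consonant_phonemes_set = set(consonant_phonemes_list)
--
-- def get_vowel_consonant_map(phonemes):
--     vowel_map = [0] * len(vowel_phonemes_list)
--     consonant_map = [0] * len(consonant_phonemes_list)
--
--     for phoneme in phonemes:
--         if phoneme in vowel_phonemes_set:
--             vowel_map[vowel_phonemes_list.index(phoneme)] += 1
--         elif phoneme in consonant_phonemes_set:
--             consonant_map[consonant_phonemes_list.index(phoneme)] += 1
--     return vowel_map, consonant_map
-- ===== SOURCE B (Python) =====
-- vowel_phonemes_list = ['AA', 'AE', 'AH', 'AO', 'AW', 'AY', 'EH', 'ER', 'EY', 'IH', 'IY', 'OW', 'OY', 'UH', 'UW']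
--
-- consonant_phonemes_list = ['P', 'B', 'CH', 'D', 'DH', 'F', 'G', 'HH', 'JH', 'K', 'L', 'M',
--      'N', 'NG', 'R', 'S', 'SH', 'T', 'TH', 'V', 'W', 'Y', 'Z', 'ZH']
--
-- def get_vowel_consonant_map(phonemes):
--     counts = {}
--     for p in phonemes:
--         counts[p] = counts.get(p, 0) + 1
--     vowel_map = [counts.get(p, 0) for p in vowel_phonemes_list]
--     consonant_map = [counts.get(p, 0) for p in consonant_phonemes_list]
--     return vowel_map, consonant_map
-- ===== Notes on version B (the rewrite author's own statement) =====
-- stated objective: alternative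
-- what changed: Replaces the per-item membership test plus list.index scan with one tally pass building a count dict over the input, followed by projection loops over the fixed vowel/consonant vocabulary lists reading counts.get(p, 0).
import Mathlib
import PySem

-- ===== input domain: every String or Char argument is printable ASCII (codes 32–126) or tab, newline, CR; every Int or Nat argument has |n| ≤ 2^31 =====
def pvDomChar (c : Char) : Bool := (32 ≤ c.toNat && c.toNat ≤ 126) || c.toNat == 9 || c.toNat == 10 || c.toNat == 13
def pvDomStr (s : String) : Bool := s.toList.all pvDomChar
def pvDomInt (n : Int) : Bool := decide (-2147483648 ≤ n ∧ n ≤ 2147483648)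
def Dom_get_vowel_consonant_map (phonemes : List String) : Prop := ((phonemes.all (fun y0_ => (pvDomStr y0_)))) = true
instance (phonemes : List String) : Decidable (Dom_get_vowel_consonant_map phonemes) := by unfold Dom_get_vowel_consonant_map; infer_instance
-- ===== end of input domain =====

-- B replaces A's per-item membership+index scan with one tally pass (a count dict) and projection loops over the fixed vocabulary lists.
-- ===== PORT A =====
def pvVowels : List String := ["AA", "AE", "AH", "AO", "AW", "AY", "EH", "ER", "EY", "IH", "IY", "OW", "OY", "UH", "UW"]

def pvConsonants : List String := ["P", "B", "CH", "D", "DH", "F", "G", "HH", "JH", "K", "L", "M",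
  "N", "NG", "R", "S", "SH", "T", "TH", "V", "W", "Y", "Z", "ZH"]

def pvVowelSet : PySem.Set String := PySem.Set.ofList pvVowels

def pvConsonantSet : PySem.Set String := PySem.Set.ofList pvConsonants

-- loop body of A: membership test on the set, then .index on the list, then in-place += 1
-- (the 'none' arms are unreachable: the membership guard ensures .index succeeds)
def pvStepA (st : List Int × List Int) (phoneme : String) : List Int × List Int :=
  if PySem.Set.contains pvVowelSet phoneme then
    match PySem.List.index? pvVowels phoneme with
    | some i => (st.1.modify i (· + 1), st.2)
    | none => st
  else if PySem.Set.contains pvConsonantSet phoneme then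
    match PySem.List.index? pvConsonants phoneme with
    | some i => (st.1, st.2.modify i (· + 1))
    | none => st
  else st

def get_vowel_consonant_map (phonemes : List String) : List Int × List Int :=
  phonemes.foldl pvStepA (List.replicate pvVowels.length 0, List.replicate pvConsonants.length 0)

-- ===== PORT B =====
def get_vowel_consonant_map_alt (phonemes : List String) : List Int × List Int :=
  let counts : PySem.Dict String Int :=
    phonemes.foldl (fun d p => d.insert p (d.getD p 0 + 1)) PySem.Dict.empty
  (pvVowels.map (fun p => counts.getD p 0), pvConsonants.map (fun p => counts.getD p 0))

-- ===== PRECONDITION & SPEC =====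
def Spec_get_vowel_consonant_map (phonemes : List String) (out : List Int × List Int) : Prop := out = get_vowel_consonant_map_alt phonemes
instance (phonemes : List String) (out : List Int × List Int) : Decidable (Spec_get_vowel_consonant_map phonemes out) := by unfold Spec_get_vowel_consonant_map; infer_instance

-- ===== CLAIM (what is proved, stated in full; the proofs are below) =====
def Claim_equal_get_vowel_consonant_map : Prop := ∀ (phonemes : List String), Dom_get_vowel_consonant_map phonemes → Spec_get_vowel_consonant_map phonemes (get_vowel_consonant_map phonemes)

-- ===== LEMMAS AND PROOFS =====

-- canonical form: each slot holds the count of its phoneme in the input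
def pvMaps (pre : List String) : List Int × List Int :=
  (pvVowels.map (fun q => (pre.count q : Int)), pvConsonants.map (fun q => (pre.count q : Int)))

lemma pv_modify_map {L : List String} {f : String → Int} {x : String} :
    ∀ {k : Nat}, L.Nodup → (hk : k < L.length) → L[k] = x →
    (L.map f).modify k (· + 1) = L.map (fun q => f q + if q = x then 1 else 0) := by
  induction L with
  | nil => intro k _ hk; simp at hk
  | cons a L ih =>
    intro k hnd hk hx
    rcases k with _ | k
    · simp at hx
      subst hx
      simp only [List.map_cons, List.modify_zero_cons]
      refine congrArg₂ _ rfl ?_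
      refine (List.map_congr_left ?_).symm
      intro q hq
      have : q ≠ a := fun h => (List.nodup_cons.mp hnd).1 (h ▸ hq)
      simp [this]
    · have hxm : x ∈ L := by
        have : k < L.length := by simpa using hk
        exact hx ▸ List.getElem_mem this
      have hax : a ≠ x := fun h => (List.nodup_cons.mp hnd).1 (h ▸ hxm)
      simp only [List.map_cons, List.modify_succ_cons, if_neg hax, add_zero]
      rw [ih (List.nodup_cons.mp hnd).2 (by simpa using hk) hx]

lemma pv_count_append (L pre : List String) (x : String) :
    L.map (fun q => ((pre ++ [x]).count q : Int))
      = L.map (fun q => (pre.count q : Int) + if q = x then 1 else 0) := by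
  refine List.map_congr_left ?_
  intro q _
  by_cases h : q = x
  · simp [List.count_append, h]
  · have hx : List.count q [x] = 0 := by
      simp only [List.count_singleton']
      simp [Ne.symm h]
    simp [List.count_append, h, hx]

lemma pv_count_append_notmem (L pre : List String) (x : String) (hx : x ∉ L) :
    L.map (fun q => ((pre ++ [x]).count q : Int)) = L.map (fun q => (pre.count q : Int)) := by
  rw [pv_count_append]
  refine List.map_congr_left ?_
  intro q hq
  have : q ≠ x := fun h => hx (h ▸ hq)
  simp [this]

lemma pv_index_some {L : List String} {x : String} (hx : x ∈ L) :
    ∃ k, PySem.List.index? L x = some k ∧ ∃ hk : k < L.length, L[k] = x := by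
  have h1 : (PySem.List.index? L x).isSome := (PySem.List.index?_isSome_iff L x).mpr hx
  obtain ⟨k, hk⟩ := Option.isSome_iff_exists.mp h1
  obtain ⟨hlt, hget, -⟩ := PySem.List.getElem_of_index?_eq_some hk
  exact ⟨k, hk, hlt, hget⟩

lemma pv_vowels_nodup : pvVowels.Nodup := by decide
lemma pv_consonants_nodup : pvConsonants.Nodup := by decide
lemma pv_disjoint : ∀ x ∈ pvVowels, x ∉ pvConsonants := by decide

lemma pv_contains_vowel (x : String) :
    PySem.Set.contains pvVowelSet x = true ↔ x ∈ pvVowels := by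
  simp [pvVowelSet, PySem.Set.contains]

lemma pv_contains_consonant (x : String) :
    PySem.Set.contains pvConsonantSet x = true ↔ x ∈ pvConsonants := by
  simp [pvConsonantSet, PySem.Set.contains]

lemma pv_stepA (pre : List String) (x : String) :
    pvStepA (pvMaps pre) x = pvMaps (pre ++ [x]) := by
  by_cases hv : x ∈ pvVowels
  · obtain ⟨k, hidx, hk, hget⟩ := pv_index_some hv
    simp only [pvStepA, (pv_contains_vowel x).mpr hv, if_true, hidx, pvMaps]
    rw [pv_modify_map pv_vowels_nodup hk hget, pv_count_append pvVowels pre x,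
      pv_count_append_notmem pvConsonants pre x (pv_disjoint x hv)]
  · have hvb : PySem.Set.contains pvVowelSet x = false := by
      rw [Bool.eq_false_iff]; intro h; exact hv ((pv_contains_vowel x).mp h)
    by_cases hcn : x ∈ pvConsonants
    · obtain ⟨k, hidx, hk, hget⟩ := pv_index_some hcn
      simp only [pvStepA, hvb, Bool.false_eq_true, if_false,
        (pv_contains_consonant x).mpr hcn, if_true, hidx, pvMaps]
      rw [pv_modify_map pv_consonants_nodup hk hget, pv_count_append pvConsonants pre x,
        pv_count_append_notmem pvVowels pre x hv]
    · have hcb : PySem.Set.contains pvConsonantSet x = false := by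
        rw [Bool.eq_false_iff]; intro h; exact hcn ((pv_contains_consonant x).mp h)
      simp only [pvStepA, hvb, hcb, Bool.false_eq_true, if_false, pvMaps]
      rw [pv_count_append_notmem pvVowels pre x hv, pv_count_append_notmem pvConsonants pre x hcn]

lemma pv_foldA : ∀ (xs pre : List String),
    xs.foldl pvStepA (pvMaps pre) = pvMaps (pre ++ xs) := by
  intro xs
  induction xs with
  | nil => intro pre; simp
  | cons x xs ih =>
    intro pre
    rw [List.foldl_cons, pv_stepA, ih]
    congr 1
    simp

lemma pv_A_eq (phonemes : List String) : get_vowel_consonant_map phonemes = pvMaps phonemes := by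
  have h0 : (List.replicate pvVowels.length (0 : Int), List.replicate pvConsonants.length (0 : Int))
      = pvMaps [] := by decide
  rw [get_vowel_consonant_map, h0, pv_foldA, List.nil_append]

lemma pv_B_eq (phonemes : List String) : get_vowel_consonant_map_alt phonemes = pvMaps phonemes := by
  rw [get_vowel_consonant_map_alt, pvMaps]
  rw [PySem.Dict.foldl_insert_getD_add_one_eq_counter]
  simp [PySem.Dict.getD_counter]

-- ===== VERDICT (by name: the statement is the Claim_ definition above) =====
theorem get_vowel_consonant_map_spec : Claim_equal_get_vowel_consonant_map := by
  intro phonemes _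
  unfold Spec_get_vowel_consonant_map
  rw [pv_A_eq, pv_B_eq]
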